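-- pv_equiv track=rewrite | github.com/julsukim/algorithm_exercise | 2023/230825/SWEA_1242_scan_code/1242_scan_code_ans.py | get_width
-- ===== SOURCE A (Python) =====
-- def get_width(arr):
--     width_list = []
--     for row in range(len(arr)):
--         count = 0
--         before = '0'  # 현재 값을 저장 (다음 값과 비교하기 위해)
--         change = 0  # 숫자가 0 -> 1, 1 -> 0으로 몇 번 바뀌었는지 확인용 변수
--         for col in range(len(arr[row])-1, -1, -1):
--             if before != arr[row][col]:
--                 # 숫자가 전환되는 횟수
--                 if change == 4:
--                     break
--                 change += 1
--                 before = arr[row][col]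
--             if arr[row][col] == '1':
--                 # 왼쪽에서 처음 만났을 경우 (시작점)
--                 if count == 0:
--                     end_point = col
--                 count += 1
--             if count and arr[row][col] == '0':
--                 count += 1
--
--         if change == 4:
--             width_list.append((count // 7, end_point))
--
--     return width_list
-- ===== SOURCE B (Python) =====
-- def get_width(arr):
--     width_list = []
--     for row in arr:
--         # run-length encoding of the row, read from the right: [[char, length], ...]
--         runs = []
--         for ch in reversed(row):
--             if runs and runs[-1][0] == ch:
--                 runs[-1][1] += 1
--             else:
--                 runs.append([ch, 1])
--         first_nonzero = bool(runs) and runs[0][0] != '0'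
--         trans = len(runs) - 1 + (1 if first_nonzero else 0) if runs else 0
--         if trans < 4:
--             continue
--         scanned = runs[:4] if first_nonzero else runs[:5]
--         count = 0
--         end_point = None
--         col = len(row) - 1
--         for ch, length in scanned:
--             if ch == '1':
--                 if end_point is None:
--                     end_point = col
--                 count += length
--             elif ch == '0' and end_point is not None:
--                 count += length
--             col -= length
--         if end_point is None:
--             continue  # no bar in the scanned region: nothing to report for this row
--         width_list.append((count // 7, end_point))
--     return width_list
-- ===== Notes on version B (the rewrite author's own statement) =====
-- stated objective: alternative
-- what changed: B replaces A's right-to-left per-character state machine (before/change/count with a break) by a run-length-encoding decomposition of each row: it builds the runs of equal characters from the right, keeps the first four (five when the row ends in '0') runs, and computes the width and endpoint arithmetically from those runs, skipping rows whose scanned region contains no '1'.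
-- intended difference: On rows whose scan reaches four character changes but whose scanned region contains no '1' (possible only for non-barcode rows), A appends (0, e) where e is the stale end_point left over from an EARLIER row's scan, while B skips the row; B's is intended because end_point is leftover loop state and the row contains no bar to report. — e.g. on get_width(["1010", "abcd"]): A returns [(0, 2)], B returns []
import Mathlib
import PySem

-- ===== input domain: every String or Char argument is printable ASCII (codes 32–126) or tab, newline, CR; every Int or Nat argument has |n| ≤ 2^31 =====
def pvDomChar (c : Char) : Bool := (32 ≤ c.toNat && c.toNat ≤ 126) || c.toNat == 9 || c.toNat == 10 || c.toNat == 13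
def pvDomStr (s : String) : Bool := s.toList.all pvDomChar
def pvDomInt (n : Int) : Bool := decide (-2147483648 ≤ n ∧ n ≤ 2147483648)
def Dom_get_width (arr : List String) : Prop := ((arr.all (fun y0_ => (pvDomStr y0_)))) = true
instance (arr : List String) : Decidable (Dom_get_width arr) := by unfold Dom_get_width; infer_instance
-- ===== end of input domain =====

-- B rewrites A's per-character state machine as a run-length decomposition of each row
-- (alternative, same cost); on rows with four changes but no '1' in the scanned region A
-- appends a stale end_point from an earlier row while B skips the row (see D_ below).

-- ===== PORT A =====
-- inner loop of A over one row: chars right-to-left (cs = reversed row), col the current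
-- column index; state (count, change, before, end_point); `break` = early return.
def pvInnerA : List Char → Int → Int → Int → Char → Option Int → Int × Int × Option Int
  | [], _, count, change, _, ep => (count, change, ep)
  | c :: rest, col, count, change, before, ep =>
    if c ≠ before ∧ change = 4 then
      (count, change, ep)
    else
      let change' := if c ≠ before then change + 1 else change
      let before' := if c ≠ before then c else before
      let ep' := if c = '1' ∧ count = 0 then some col else ep
      let count' := if c = '1' then count + 1 else count
      let count'' := if count' ≠ 0 ∧ c = '0' then count' + 1 else count'
      pvInnerA rest (col - 1) count'' change' before' ep'

-- outer loop of A; end_point is a Python local that SURVIVES across rows, threaded here as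
-- an Option (none = not yet assigned; `.getD 0` is only reached where Python raises
-- NameError, which Pre_ excludes).
def pvAuxA : List String → Option Int → List (Int × Int)
  | [], _ => []
  | row :: rest, ep =>
    let r := pvInnerA row.toList.reverse ((row.toList.length : Int) - 1) 0 0 '0' ep
    if r.2.1 = 4 then (PySem.Int.floordiv r.1 7, r.2.2.getD 0) :: pvAuxA rest r.2.2
    else pvAuxA rest r.2.2

def get_width (arr : List String) : List (Int × Int) := pvAuxA arr none

-- ===== PORT B =====
-- Source B: run-length encoding of the reversed row, appending to / bumping the LAST entry.
def pvBRuns (cs : List Char) : List (Char × Nat) :=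
  cs.foldl (fun runs ch =>
    match runs.getLast? with
    | some (c, n) => if c = ch then runs.dropLast ++ [(c, n + 1)] else runs ++ [(ch, 1)]
    | none => [(ch, 1)]) []

-- Source B: one row of B; none = `continue`
def pvBRow (row : String) : Option (Int × Int) :=
  let runs := pvBRuns row.toList.reverse
  let firstNonzero : Bool := match runs with | (c, _) :: _ => c ≠ '0' | [] => false
  let trans : Int := if runs.isEmpty then 0
    else (runs.length : Int) - 1 + (if firstNonzero then 1 else 0)
  if trans < 4 then none
  else
    let scanned := if firstNonzero then runs.take 4 else runs.take 5
    let st := scanned.foldl (fun (st : Int × Option Int × Int) cl =>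
        if cl.1 = '1' then
          (st.1 + (cl.2 : Int), (if st.2.1 = none then some st.2.2 else st.2.1), st.2.2 - (cl.2 : Int))
        else if cl.1 = '0' ∧ st.2.1 ≠ none then
          (st.1 + (cl.2 : Int), st.2.1, st.2.2 - (cl.2 : Int))
        else
          (st.1, st.2.1, st.2.2 - (cl.2 : Int)))
      ((0 : Int), (none : Option Int), (row.toList.length : Int) - 1)
    match st.2.1 with
    | none => none
    | some e => some (PySem.Int.floordiv st.1 7, e)

def get_width_alt (arr : List String) : List (Int × Int) := arr.filterMap pvBRow

-- ===== PRECONDITION & SPEC =====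
-- closed-form measures of a row (pure input arithmetic: counts of unequal adjacent
-- character pairs; no run scan, no re-simulation of either program)
def pvDiffs (l : List Char) : Nat := (l.zip l.tail).countP (fun p => decide (p.1 ≠ p.2))
-- number of character changes A's right-to-left scan of the row sees (before starts '0',
-- so a non-'0' last character contributes one extra change)
def pvTransC (row : String) : Nat :=
  pvDiffs row.toList.reverse +
    (row.toList.reverse.take 1).countP (fun c => decide (c ≠ '0'))
-- the columns A scans (those reached before the fifth change) contain a '1' —
-- exactly the rows on which A's scan assigns end_point
def pvHasBar (row : String) : Bool :=
  (List.range row.toList.reverse.length).any (fun k =>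
    decide (row.toList.reverse.getD k ' ' = '1' ∧
      pvDiffs (row.toList.reverse.take (k + 1)) +
        (row.toList.reverse.take 1).countP (fun c => decide (c ≠ '0')) ≤ 4))
-- the row reaches four changes but the scanned columns hold no '1' (A then appends a
-- stale end_point, or raises NameError if no earlier row assigned one)
def pvBadC (row : String) : Bool := decide (4 ≤ pvTransC row) && !pvHasBar row

-- Pre_ excludes exactly the inputs where Python A raises NameError (end_point unassigned):
-- a bad row occurring before any row whose scan assigned end_point.
def Pre_get_width (arr : List String) : Prop :=
  ∀ i : Fin arr.length, pvBadC arr[i] = true →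
    ∃ j : Fin arr.length, (j : Nat) < (i : Nat) ∧ pvHasBar arr[j] = true
instance (arr : List String) : Decidable (Pre_get_width arr) := by
  unfold Pre_get_width; infer_instance

def pvWitness_get_width : List String := ["10101"]

-- On rows with four character changes but no '1' among the scanned columns, A appends
-- (0, e) with e the stale end_point left by an EARLIER row's scan, while B skips the
-- row; B's is the intended behaviour since such a row has no bar to report.
def D_get_width (arr : List String) : Prop := arr.any pvBadC = true
instance (arr : List String) : Decidable (D_get_width arr) := by
  unfold D_get_width; infer_instance

def Spec_get_width (arr : List String) (out : List (Int × Int)) : Prop :=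
  ¬ D_get_width arr → out = get_width_alt arr
instance (arr : List String) (out : List (Int × Int)) : Decidable (Spec_get_width arr out) := by
  unfold Spec_get_width; infer_instance

def pvDiffWitness_get_width : List String := ["1010", "abcd"]
def pvDiffWitnessOut_get_width : (List (Int × Int)) × (List (Int × Int)) := ([(0, 2)], [])

-- ===== CLAIM (what is proved, stated in full; the proofs are below) =====
def Claim_unchanged_get_width : Prop :=
  ∀ (arr : List String), Dom_get_width arr → Pre_get_width arr →
    Spec_get_width arr (get_width arr)
def Claim_changed_get_width : Prop :=
  Dom_get_width (pvDiffWitness_get_width) ∧ Pre_get_width (pvDiffWitness_get_width) ∧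
  D_get_width (pvDiffWitness_get_width) ∧
  get_width (pvDiffWitness_get_width) = pvDiffWitnessOut_get_width.1 ∧
  get_width_alt (pvDiffWitness_get_width) = pvDiffWitnessOut_get_width.2 ∧
  pvDiffWitnessOut_get_width.1 ≠ pvDiffWitnessOut_get_width.2
def Claim_exact_get_width : Prop :=
  ∀ (arr : List String), Dom_get_width arr → Pre_get_width arr → D_get_width arr →
    get_width arr ≠ get_width_alt arr

-- ===== LEMMAS AND PROOFS =====

-- proof-layer device: runs of equal adjacent characters of the reversed row
-- (front = rightmost run); used only inside the proofs below
def pvRunsR : List Char → List (Char × Nat)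
  | [] => []
  | c :: cs =>
    match pvRunsR cs with
    | (d, n) :: rs => if c = d then (c, n + 1) :: rs else (c, 1) :: (d, n) :: rs
    | [] => [(c, 1)]

-- run-level restatements of the row measures
def pvTransRuns (rs : List (Char × Nat)) : Nat :=
  match rs with
  | [] => 0
  | (c, _) :: _ => rs.length - 1 + (if c = '0' then 0 else 1)

def pvLimRuns (rs : List (Char × Nat)) : Nat :=
  match rs with
  | (c, _) :: _ => if c = '0' then 5 else 4
  | [] => 5

def pvSetsRuns (row : String) : Bool :=
  let rs := pvRunsR row.toList.reverse
  (rs.take (pvLimRuns rs)).any (fun r => r.1 = '1')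

def pvBadRuns (row : String) : Bool :=
  let rs := pvRunsR row.toList.reverse
  decide (4 ≤ pvTransRuns rs) && !pvSetsRuns row

theorem pvDiffs_cons₂ (a b : Char) (l : List Char) :
    pvDiffs (a :: b :: l) = (if a = b then 0 else 1) + pvDiffs (b :: l) := by
  simp only [pvDiffs, List.tail_cons, List.zip_cons_cons, List.countP_cons]
  by_cases h : a = b <;> simp [h] <;> omega

theorem pvRunsR_head (c : Char) (cs : List Char) :
    ∃ n rs, pvRunsR (c :: cs) = (c, n) :: rs := by
  simp only [pvRunsR]
  cases hr : pvRunsR cs with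
  | nil => exact ⟨1, [], rfl⟩
  | cons p rs =>
    cases p with
    | mk d n => by_cases h : c = d <;> simp [h] <;> exact ⟨_, _, rfl⟩

theorem pvRunsR_cons_run (c : Char) (cs : List Char) (d : Char) (n : Nat)
    (rs : List (Char × Nat)) (h : pvRunsR cs = (d, n) :: rs) :
    pvRunsR (c :: cs) = if c = d then (c, n + 1) :: rs else (c, 1) :: (d, n) :: rs := by
  simp only [pvRunsR, h]

theorem pvRunsR_length : ∀ (c : Char) (cs : List Char),
    (pvRunsR (c :: cs)).length = pvDiffs (c :: cs) + 1 := by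
  intro c cs
  induction cs generalizing c with
  | nil => simp [pvRunsR, pvDiffs]
  | cons c2 cs' ih =>
    obtain ⟨n, rs, hr⟩ := pvRunsR_head c2 cs'
    have hlen := ih c2
    rw [hr] at hlen
    rw [pvDiffs_cons₂]
    by_cases h : c = c2
    · have : pvRunsR (c :: c2 :: cs') = (c, n + 1) :: rs := by
        rw [pvRunsR_cons_run c _ _ _ _ hr, if_pos h]
      rw [this, h]
      simpa [h] using hlen
    · have : pvRunsR (c :: c2 :: cs') = (c, 1) :: (c2, n) :: rs := by
        rw [pvRunsR_cons_run c _ _ _ _ hr, if_neg h]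
      rw [this]
      simp only [List.length_cons] at hlen ⊢
      simp [h]
      omega

-- the scanned region contains a '1' iff one of the first m+1 runs is a '1' run
theorem pvKeyProp : ∀ (l : List Char) (m : Nat),
    (∃ k, k < l.length ∧ l.getD k ' ' = '1' ∧ pvDiffs (l.take (k + 1)) ≤ m) ↔
      (((pvRunsR l).take (m + 1)).any (fun r => r.1 = '1') = true) := by
  intro l
  induction l with
  | nil => intro m; simp [pvRunsR]
  | cons c cs ih =>
    intro m
    cases cs with
    | nil =>
      constructor
      · rintro ⟨k, hk, h1, -⟩
        have : k = 0 := by simpa using hk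
        subst this
        simp only [List.getD_cons_zero] at h1
        simp [pvRunsR, h1]
      · intro h
        refine ⟨0, by simp, ?_, ?_⟩
        · simpa [pvRunsR] using h
        · simp [pvDiffs]
    | cons c2 cs' =>
      obtain ⟨n, rs, hr⟩ := pvRunsR_head c2 cs'
      have hL : (∃ k, k < (c :: c2 :: cs').length ∧ (c :: c2 :: cs').getD k ' ' = '1' ∧
            pvDiffs ((c :: c2 :: cs').take (k + 1)) ≤ m) ↔
          (c = '1' ∨ ∃ k, k < (c2 :: cs').length ∧ (c2 :: cs').getD k ' ' = '1' ∧
            (if c = c2 then 0 else 1) + pvDiffs ((c2 :: cs').take (k + 1)) ≤ m) := by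
        constructor
        · rintro ⟨k, hk, h1, hd⟩
          cases k with
          | zero => exact Or.inl (by simpa using h1)
          | succ k' =>
            refine Or.inr ⟨k', by simpa using hk, by simpa using h1, ?_⟩
            have ht : (c :: c2 :: cs').take (k' + 1 + 1) = c :: (c2 :: cs').take (k' + 1) := by
              simp [List.take_succ_cons]
            rw [ht, List.take_succ_cons, pvDiffs_cons₂, ← List.take_succ_cons] at hd
            exact hd
        · rintro (h1 | ⟨k, hk, h1, hd⟩)
          · exact ⟨0, by simp, by simpa using h1, by simp [pvDiffs]⟩
          · refine ⟨k + 1, by simpa using hk, by simpa using h1, ?_⟩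
            have ht : (c :: c2 :: cs').take (k + 1 + 1) = c :: (c2 :: cs').take (k + 1) := by
              simp [List.take_succ_cons]
            rw [ht, List.take_succ_cons, pvDiffs_cons₂, ← List.take_succ_cons]
            exact hd
      rw [hL]
      by_cases h : c = c2
      · subst h
        have hruns : pvRunsR (c :: c :: cs') = (c, n + 1) :: rs := by
          rw [pvRunsR_cons_run c _ _ _ _ hr, if_pos rfl]
        have hiff : (c = '1' ∨ ∃ k, k < (c :: cs').length ∧ (c :: cs').getD k ' ' = '1' ∧
              (if c = c then 0 else 1) + pvDiffs ((c :: cs').take (k + 1)) ≤ m) ↔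
            (∃ k, k < (c :: cs').length ∧ (c :: cs').getD k ' ' = '1' ∧
              pvDiffs ((c :: cs').take (k + 1)) ≤ m) := by
          simp only [eq_self_iff_true, if_true, if_pos, Nat.zero_add]
          constructor
          · rintro (h1 | h1)
            · exact ⟨0, by simp, by simpa using h1, by simp [pvDiffs]⟩
            · exact h1
          · exact Or.inr
        rw [hiff, ih m, hr, hruns]
        simp [List.take_succ_cons]
      · have hruns : pvRunsR (c :: c2 :: cs') = (c, 1) :: (c2, n) :: rs := by
          rw [pvRunsR_cons_run c _ _ _ _ hr, if_neg h]
        rw [hruns]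
        cases m with
        | zero =>
          have hrhs : ((List.take (0 + 1) ((c, 1) :: (c2, n) :: rs)).any
              (fun r => r.1 = '1') = true) ↔ (c = '1') := by
            simp
          rw [hrhs]
          constructor
          · rintro (h1 | ⟨k, hk, h1, hd⟩)
            · exact h1
            · rw [if_neg h] at hd; omega
          · exact Or.inl
        | succ m' =>
          have ihm := ih m'
          rw [hr] at ihm
          have hrhs : ((List.take (m' + 1 + 1) ((c, 1) :: (c2, n) :: rs)).any
              (fun r => r.1 = '1') = true) ↔
              (c = '1' ∨ ((List.take (m' + 1) ((c2, n) :: rs)).any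
                (fun r => r.1 = '1') = true)) := by
            simp [List.take_succ_cons]
          rw [hrhs, ← ihm]
          refine or_congr Iff.rfl ?_
          constructor <;> rintro ⟨k, hk, h1, hd⟩ <;>
            refine ⟨k, hk, h1, ?_⟩ <;> rw [if_neg h] at * <;> omega

-- bridges: the closed-form row measures equal the run-level ones
theorem pvTransC_eq (row : String) :
    pvTransC row = pvTransRuns (pvRunsR row.toList.reverse) := by
  unfold pvTransC
  cases hl : row.toList.reverse with
  | nil => simp [pvRunsR, pvTransRuns, pvDiffs]
  | cons c cs =>
    obtain ⟨n, rs, hr⟩ := pvRunsR_head c cs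
    have hlen := pvRunsR_length c cs
    rw [hr] at hlen ⊢
    simp only [pvTransRuns, List.length_cons] at *
    by_cases h : c = '0'
    · subst h
      simp
      omega
    · simp [h]
      omega

theorem pvHasBar_eq (row : String) : pvHasBar row = pvSetsRuns row := by
  have hS : pvSetsRuns row =
      ((pvRunsR row.toList.reverse).take (pvLimRuns (pvRunsR row.toList.reverse))).any
        (fun r => r.1 = '1') := rfl
  rw [hS]
  unfold pvHasBar
  cases hl : row.toList.reverse with
  | nil => simp [pvRunsR, pvLimRuns]
  | cons c cs =>
    obtain ⟨n, rs, hr⟩ := pvRunsR_head c cs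
    rw [hr]
    have hkey4 := pvKeyProp (c :: cs) 4
    have hkey3 := pvKeyProp (c :: cs) 3
    rw [hr] at hkey4 hkey3
    rw [Bool.eq_iff_iff]
    by_cases h : c = '0'
    · have hlim : pvLimRuns ((c, n) :: rs) = 5 := by simp [pvLimRuns, h]
      rw [hlim]
      have hE : ((List.range (c :: cs).length).any (fun k =>
          decide ((c :: cs).getD k ' ' = '1' ∧
            pvDiffs ((c :: cs).take (k + 1)) +
              (((c :: cs).take 1).countP (fun c => decide (c ≠ '0'))) ≤ 4))) = true ↔
          (∃ k, k < (c :: cs).length ∧ (c :: cs).getD k ' ' = '1' ∧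
            pvDiffs ((c :: cs).take (k + 1)) ≤ 4) := by
        have ha : (((c :: cs).take 1).countP (fun c => decide (c ≠ '0'))) = 0 := by simp [h]
        simp only [List.any_eq_true, List.mem_range, decide_eq_true_eq, ha]
        constructor
        · rintro ⟨k, hk, h1, hd⟩; exact ⟨k, hk, h1, by omega⟩
        · rintro ⟨k, hk, h1, hd⟩; exact ⟨k, hk, h1, by omega⟩
      rw [hE, hkey4]
    · have hlim : pvLimRuns ((c, n) :: rs) = 4 := by simp [pvLimRuns, h]
      rw [hlim]
      have hE : ((List.range (c :: cs).length).any (fun k =>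
          decide ((c :: cs).getD k ' ' = '1' ∧
            pvDiffs ((c :: cs).take (k + 1)) +
              (((c :: cs).take 1).countP (fun c => decide (c ≠ '0'))) ≤ 4))) = true ↔
          (∃ k, k < (c :: cs).length ∧ (c :: cs).getD k ' ' = '1' ∧
            pvDiffs ((c :: cs).take (k + 1)) ≤ 3) := by
        have ha : (((c :: cs).take 1).countP (fun c => decide (c ≠ '0'))) = 1 := by simp [h]
        simp only [List.any_eq_true, List.mem_range, decide_eq_true_eq, ha]
        constructor
        · rintro ⟨k, hk, h1, hd⟩; exact ⟨k, hk, h1, by omega⟩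
        · rintro ⟨k, hk, h1, hd⟩; exact ⟨k, hk, h1, by omega⟩
      rw [hE, hkey3]

theorem pvBadC_eq (row : String) : pvBadC row = pvBadRuns row := by
  unfold pvBadC pvBadRuns
  rw [pvTransC_eq, pvHasBar_eq]

def pvStep (runs : List (Char × Nat)) (ch : Char) : List (Char × Nat) :=
  match runs.getLast? with
  | some (c, n) => if c = ch then runs.dropLast ++ [(c, n + 1)] else runs ++ [(ch, 1)]
  | none => [(ch, 1)]

theorem pvRunsR_nil_iff (cs : List Char) : pvRunsR cs = [] ↔ cs = [] := by
  cases cs with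
  | nil => simp [pvRunsR]
  | cons c cs =>
    simp only [pvRunsR]
    constructor
    · intro h
      cases hr : pvRunsR cs with
      | nil => simp [hr] at h
      | cons p rs => cases p; simp [hr] at h; split at h <;> simp_all
    · intro h; exact absurd h (by simp)

theorem pvRunsR_concat (cs : List Char) (c : Char) :
    pvRunsR (cs ++ [c]) = pvStep (pvRunsR cs) c := by
  induction cs with
  | nil => simp [pvRunsR, pvStep]
  | cons a cs ih =>
    simp only [List.cons_append, pvRunsR, ih]
    cases hr : pvRunsR cs with
    | nil =>
      have : cs = [] := (pvRunsR_nil_iff cs).mp hr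
      subst this
      simp only [pvRunsR, pvStep]
      by_cases h : a = c <;> simp [h, List.getLast?]
    | cons p rs =>
      cases p with
      | mk d n =>
        simp only [pvStep]
        cases rs with
        | nil =>
          by_cases h : d = c <;> by_cases h2 : a = d <;>
            simp [h, h2, List.getLast?, List.dropLast] <;> simp_all
        | cons q rs' =>
          -- getLast? of (d,n)::q::rs' is getLast? of q::rs'
          by_cases h2 : a = d <;>
            simp only [h2, if_true, if_false, List.getLast?_cons_cons] <;>
            rcases hq : (q :: rs').getLast? with _ | ⟨e, m⟩ <;>
              first
                | (simp_all [List.getLast?_eq_none_iff]; done)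
                | (simp only [hq]; by_cases he : e = c <;>
                     simp [he, h2, List.dropLast_cons₂])
theorem pvBRuns_eq (cs : List Char) : pvBRuns cs = pvRunsR cs := by
  induction cs using List.reverseRecOn with
  | nil => simp [pvBRuns, pvRunsR]
  | append_singleton cs c ih =>
    simp only [pvBRuns, List.foldl_append, List.foldl_cons, List.foldl_nil] at *
    rw [ih, pvRunsR_concat]; rfl

def pvChunkCount (c : Char) (n : Nat) (count : Int) : Int :=
  if c = '1' then count + n else if c = '0' ∧ count ≠ 0 then count + n else count

def pvChunkEp (c : Char) (col : Int) (count : Int) (ep : Option Int) : Option Int :=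
  if c = '1' ∧ count = 0 then some col else ep

def pvRunA : List (Char × Nat) → Int → Int → Int → Char → Option Int → Int × Int × Option Int
  | [], _, count, change, _, ep => (count, change, ep)
  | (c, n) :: rest, col, count, change, before, ep =>
    if c = before then
      pvRunA rest (col - n) (pvChunkCount c n count) change before (pvChunkEp c col count ep)
    else if change = 4 then (count, change, ep)
    else
      pvRunA rest (col - n) (pvChunkCount c n count) (change + 1) c (pvChunkEp c col count ep)

-- one-character composition: a chunk of size n+1 = one character then a chunk of size n
theorem pvChunk_step (c : Char) (n : Nat) (col count : Int) (ep : Option Int) (h : 0 ≤ count) :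
    pvChunkCount c (n + 1) count =
      pvChunkCount c n (if (if c = '1' then count + 1 else count) ≠ 0 ∧ c = '0'
        then (if c = '1' then count + 1 else count) + 1 else (if c = '1' then count + 1 else count)) ∧
    pvChunkEp c col count ep =
      pvChunkEp c (col - 1)
        (if (if c = '1' then count + 1 else count) ≠ 0 ∧ c = '0'
          then (if c = '1' then count + 1 else count) + 1 else (if c = '1' then count + 1 else count))
        (pvChunkEp c col count ep) := by
  constructor <;>
    (simp only [pvChunkCount, pvChunkEp]
     by_cases h1 : c = '1' <;> by_cases h0 : c = '0' <;> by_cases hc : count = 0 <;>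
       simp_all <;> push_cast <;> omega)

theorem pvChunk_one (c : Char) (count : Int) :
    pvChunkCount c 1 count =
      (if (if c = '1' then count + 1 else count) ≠ 0 ∧ c = '0'
        then (if c = '1' then count + 1 else count) + 1 else (if c = '1' then count + 1 else count)) := by
  simp only [pvChunkCount]
  by_cases h1 : c = '1' <;> by_cases h0 : c = '0' <;> by_cases hc : count = 0 <;>
    simp_all <;> omega

theorem pvRunA_cons (c : Char) (cs : List Char) (col count change : Int) (before : Char)
    (ep : Option Int) (h : 0 ≤ count) (hnb : ¬(c ≠ before ∧ change = 4)) :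
    pvRunA (pvRunsR (c :: cs)) col count change before ep =
      pvRunA (pvRunsR cs) (col - 1)
        (if (if c = '1' then count + 1 else count) ≠ 0 ∧ c = '0'
          then (if c = '1' then count + 1 else count) + 1
          else (if c = '1' then count + 1 else count))
        (if c ≠ before then change + 1 else change)
        (if c ≠ before then c else before)
        (if c = '1' ∧ count = 0 then some col else ep) := by
  have hstep := pvChunk_step c 0 col count ep h
  simp only [pvRunsR]
  cases hr : pvRunsR cs with
  | nil =>
    by_cases hcb : c = before
    · subst hcb
      simp only [pvRunA, ne_eq, not_true_eq_false, if_true, if_false, ite_self]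
      rw [← pvChunk_one c count]
      simp [pvChunkEp]
    · have hch : ¬change = 4 := fun hc => hnb ⟨hcb, hc⟩
      simp only [pvRunA, hcb, hch, ne_eq, not_false_eq_true, if_true, if_false]
      rw [← pvChunk_one c count]
      simp [pvChunkEp, hcb, hch]
  | cons p rs =>
    cases p with
    | mk d n =>
      by_cases hcd : c = d
      · subst hcd
        simp only [if_pos rfl]
        have hc1 := pvChunk_step c n col count ep h
        by_cases hcb : c = before
        · subst hcb
          simp only [pvRunA, eq_self_iff_true, if_true, if_pos rfl, ne_eq, not_true_eq_false, if_false, ite_self]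
          rw [hc1.1, hc1.2]
          congr 1
          push_cast; ring
        · have hch : ¬change = 4 := fun hc => hnb ⟨hcb, hc⟩
          simp only [pvRunA, hcb, hch, ne_eq, not_false_eq_true, if_true, if_false]
          rw [hc1.1, hc1.2]
          congr 1
          push_cast; ring
      · simp only [if_neg hcd]
        by_cases hcb : c = before
        · subst hcb
          simp only [pvRunA, eq_self_iff_true, if_true, if_pos rfl, ne_eq, not_true_eq_false, if_false, ite_self]
          rw [← pvChunk_one c count]
          simp [pvChunkEp]
        · have hch : ¬change = 4 := fun hc => hnb ⟨hcb, hc⟩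
          simp only [pvRunA, hcb, hch, ne_eq, not_false_eq_true, if_true, if_false]
          rw [← pvChunk_one c count]
          simp [pvChunkEp, hcb, hch]

theorem pvCount_step_nonneg (c : Char) (count : Int) (h : 0 ≤ count) :
    0 ≤ (if (if c = '1' then count + 1 else count) ≠ 0 ∧ c = '0'
        then (if c = '1' then count + 1 else count) + 1
        else (if c = '1' then count + 1 else count)) := by
  split_ifs <;> omega

theorem pvBridge (cs : List Char) :
    ∀ (col count change : Int) (before : Char) (ep : Option Int), 0 ≤ count →
    pvInnerA cs col count change before ep = pvRunA (pvRunsR cs) col count change before ep := by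
  induction cs with
  | nil => intro col count change before ep h; simp [pvInnerA, pvRunsR, pvRunA]
  | cons c cs ih =>
    intro col count change before ep h
    by_cases hb : c ≠ before ∧ change = 4
    · obtain ⟨n, rs, hr⟩ := pvRunsR_head c cs
      rw [hr]
      simp [pvInnerA, pvRunA, hb.1, hb.2]
    · rw [pvRunA_cons c cs col count change before ep h hb]
      simp only [pvInnerA, hb, if_false]
      exact ih _ _ _ _ _ (pvCount_step_nonneg c count h)

def pvPhase2 : List (Char × Nat) → Int → Int → Option Int → Int × Option Int
  | [], _, count, ep => (count, ep)
  | (c, n) :: rest, col, count, ep =>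
    pvPhase2 rest (col - n) (pvChunkCount c n count) (pvChunkEp c col count ep)

def pvF2 : (Int × Option Int × Int) → (Char × Nat) → (Int × Option Int × Int) := fun st cl =>
  if cl.1 = '1' then
    (st.1 + (cl.2 : Int), (if st.2.1 = none then some st.2.2 else st.2.1), st.2.2 - (cl.2 : Int))
  else if cl.1 = '0' ∧ st.2.1 ≠ none then
    (st.1 + (cl.2 : Int), st.2.1, st.2.2 - (cl.2 : Int))
  else
    (st.1, st.2.1, st.2.2 - (cl.2 : Int))

def pvAdjOk : List (Char × Nat) → Prop
  | [] => True
  | [_] => True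
  | a :: b :: l => a.1 ≠ b.1 ∧ pvAdjOk (b :: l)

theorem pvAdjOk_tail (p : Char × Nat) (rs : List (Char × Nat)) (h : pvAdjOk (p :: rs)) :
    pvAdjOk rs := by
  cases rs with
  | nil => trivial
  | cons q l => exact h.2

theorem pvAdjOk_head (p : Char × Nat) (rs : List (Char × Nat)) (h : pvAdjOk (p :: rs)) :
    ∀ q ∈ rs.head?, q.1 ≠ p.1 := by
  cases rs with
  | nil => simp
  | cons q l => intro x hx; simp at hx; subst hx; exact fun he => h.1 he.symm

theorem pvRunsR_adj (cs : List Char) : pvAdjOk (pvRunsR cs) := by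
  induction cs with
  | nil => simp [pvRunsR, pvAdjOk]
  | cons c cs ih =>
    simp only [pvRunsR]
    cases hr : pvRunsR cs with
    | nil => simp [pvAdjOk]
    | cons p rs =>
      cases p with
      | mk d n =>
        rw [hr] at ih
        by_cases h : c = d
        · subst h
          simp only [if_pos rfl]
          cases rs with
          | nil => simp [pvAdjOk]
          | cons q rs' => exact ⟨ih.1, ih.2⟩
        · simp only [if_neg h]
          exact ⟨h, ih⟩

theorem pvRunsR_pos (cs : List Char) : ∀ p ∈ pvRunsR cs, 1 ≤ p.2 := by
  induction cs with
  | nil => simp [pvRunsR]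
  | cons c cs ih =>
    simp only [pvRunsR]
    cases hr : pvRunsR cs with
    | nil => simp
    | cons p rs =>
      cases p with
      | mk d n =>
        rw [hr] at ih
        by_cases h : c = d <;> simp only [if_pos, if_neg, h] <;> intro q hq
        · rcases List.mem_cons.mp hq with h1 | h1
          · subst h1; omega
          · exact ih q (List.mem_cons_of_mem _ h1)
        · rcases List.mem_cons.mp hq with h1 | h1
          · subst h1; omega
          · exact ih q h1

-- characterization of pvRunA when every run changes the character
theorem pvRunA_eq (rs : List (Char × Nat)) :
    ∀ (col count change : Int) (before : Char) (ep : Option Int),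
      pvAdjOk rs →
      (∀ p ∈ rs.head?, p.1 ≠ before) → 0 ≤ change → change ≤ 4 →
      pvRunA rs col count change before ep =
        ((pvPhase2 (rs.take (4 - change).toNat) col count ep).1,
          min (change + rs.length) 4,
          (pvPhase2 (rs.take (4 - change).toNat) col count ep).2) := by
  induction rs with
  | nil =>
    intro col count change before ep _ _ h0 h4
    simp only [pvRunA, List.take_nil, pvPhase2, List.length_nil, Prod.mk.injEq, true_and, and_true]
    push_cast
    omega
  | cons p rs ih =>
    intro col count change before ep hchain hhead h0 h4
    cases p with
    | mk c n =>
      have hcb : c ≠ before := hhead (c, n) (by simp)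
      by_cases hch : change = 4
      · subst hch
        simp only [pvRunA, if_neg hcb, if_true]
        norm_num [pvPhase2, List.take_zero, Prod.ext_iff]
        omega
      · have hlt : change < 4 := lt_of_le_of_ne h4 hch
        simp only [pvRunA, if_neg hcb, if_neg hch]
        rw [ih (col - n) (pvChunkCount c n count) (change + 1) c (pvChunkEp c col count ep)
          (pvAdjOk_tail _ _ hchain)
          (fun q hq => pvAdjOk_head _ _ hchain q hq)
          (by omega) (by omega)]
        have htake : (4 - change).toNat = (4 - (change + 1)).toNat + 1 := by omega
        rw [htake]
        simp only [List.take_succ_cons, pvPhase2, List.length_cons, Prod.mk.injEq, true_and,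
          and_true]
        push_cast
        omega

-- B's fold versus pvPhase2: the A-side threads the caller's end_point, the B-side starts
-- from none; they stay aligned once a '1' run has been seen
theorem pvFold_eq (rs : List (Char × Nat)) :
    ∀ (col count : Int) (epa epb : Option Int), 0 ≤ count →
      ((epb = none ∧ count = 0) ∨ (epb = epa ∧ epb ≠ none ∧ count ≠ 0)) →
      (∀ p ∈ rs, 1 ≤ p.2) →
      (rs.foldl pvF2 (count, epb, col)).1 = (pvPhase2 rs col count epa).1 ∧
      (pvPhase2 rs col count epa).2 = ((rs.foldl pvF2 (count, epb, col)).2.1).or epa ∧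
      ((rs.foldl pvF2 (count, epb, col)).2.1 = none ↔
        (epb = none ∧ ∀ p ∈ rs, p.1 ≠ '1')) := by
  induction rs with
  | nil =>
    intro col count epa epb h0 hinv hpos
    rcases hinv with ⟨hb, -⟩ | ⟨hba, hb, -⟩
    · subst hb; simp [pvPhase2]
    · cases epb with
      | none => exact absurd rfl hb
      | some v => simp [pvPhase2, ← hba]
  | cons p rs ih =>
    intro col count epa epb h0 hinv hpos
    cases p with
    | mk c n =>
      have hn : 1 ≤ n := hpos (c, n) (by simp)
      have hpos' : ∀ p ∈ rs, 1 ≤ p.2 := fun q hq => hpos q (List.mem_cons_of_mem _ hq)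
      simp only [List.foldl_cons, pvPhase2, pvF2]
      by_cases h1 : c = '1'
      · subst h1
        simp only [if_pos rfl, pvChunkCount, pvChunkEp]
        by_cases hc0 : count = 0
        · have hb : epb = none := by
            rcases hinv with ⟨hb, -⟩ | ⟨-, -, hc⟩
            · exact hb
            · exact absurd hc0 hc
          subst hb; subst hc0
          simp only [eq_self_iff_true, and_true, if_pos, if_true, zero_add]
          have h := ih (col - n) (n : Int) (some col) (some col) (by omega)
            (Or.inr ⟨rfl, by simp, by omega⟩) hpos'
          refine ⟨h.1, ?_, ?_⟩
          · rw [h.2.1]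
            have hne : (rs.foldl pvF2 ((n : Int), some col, col - n)).2.1 ≠ none := by
              intro hx
              exact absurd (h.2.2.mp hx).1 (by simp)
            cases hx : (rs.foldl pvF2 ((n : Int), some col, col - n)).2.1 with
            | none => exact absurd hx hne
            | some e => simp
          · rw [h.2.2]; simp
        · have hinv' : epb = epa ∧ epb ≠ none ∧ count ≠ 0 := by
            rcases hinv with ⟨-, hc⟩ | h'
            · exact absurd hc hc0
            · exact h'
          obtain ⟨hba, hb, -⟩ := hinv'
          simp only [if_neg hc0, if_neg hb, hc0, and_false, if_false, ite_self,
            eq_self_iff_true, if_true, true_and]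
          have h := ih (col - n) (count + n) epa epb (by omega)
            (Or.inr ⟨hba, hb, by omega⟩) hpos'
          refine ⟨h.1, h.2.1, ?_⟩
          rw [h.2.2]
          simp [hb]
      · have hce : pvChunkEp c col count epa = epa := by simp [pvChunkEp, h1]
        rw [hce]
        by_cases h0' : c = '0' ∧ epb ≠ none
        · have hinv' : epb = epa ∧ epb ≠ none ∧ count ≠ 0 := by
            rcases hinv with ⟨hb, -⟩ | h'
            · exact absurd hb h0'.2
            · exact h'
          have hc0 : ¬count = 0 := hinv'.2.2
          have hcnt : pvChunkCount c n count = count + n := by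
            simp [pvChunkCount, h1, h0'.1, hc0]
          rw [hcnt]
          simp only [if_neg h1, if_pos h0']
          have h := ih (col - n) (count + n) epa epb (by omega)
            (Or.inr ⟨hinv'.1, hinv'.2.1, by omega⟩) hpos'
          exact ⟨h.1, h.2.1, by rw [h.2.2]; simp [h1]⟩
        · have hcnt : pvChunkCount c n count = count := by
            simp only [pvChunkCount, if_neg h1]
            by_cases hz : c = '0'
            · subst hz
              have hcz : count = 0 := by
                by_contra hnz
                rcases hinv with ⟨-, hc⟩ | ⟨-, hb, -⟩
                · exact hnz hc
                · exact h0' ⟨rfl, hb⟩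
              simp [hcz]
            · simp [hz]
          rw [hcnt]
          simp only [if_neg h1, if_neg h0']
          have h := ih (col - n) count epa epb h0 hinv hpos'
          exact ⟨h.1, h.2.1, by rw [h.2.2]; simp [h1]⟩

theorem pvRow_main (row : String) (ep : Option Int) :
    ((pvInnerA row.toList.reverse ((row.toList.length : Int) - 1) 0 0 '0' ep).2.1 = 4 ↔
      4 ≤ pvTransRuns (pvRunsR row.toList.reverse)) ∧
    (4 ≤ pvTransRuns (pvRunsR row.toList.reverse) → pvSetsRuns row = true →
      pvBRow row = some
        (PySem.Int.floordiv (pvInnerA row.toList.reverse ((row.toList.length : Int) - 1) 0 0 '0' ep).1 7,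
         ((pvInnerA row.toList.reverse ((row.toList.length : Int) - 1) 0 0 '0' ep).2.2).getD 0)) ∧
    (¬(4 ≤ pvTransRuns (pvRunsR row.toList.reverse) ∧ pvSetsRuns row = true) → pvBRow row = none) := by
  have hbr := pvBridge row.toList.reverse ((row.toList.length : Int) - 1) 0 0 '0' ep le_rfl
  rw [hbr]
  have hF2 : (fun (st : Int × Option Int × Int) (cl : Char × Nat) =>
        if cl.1 = '1' then
          (st.1 + (cl.2 : Int), (if st.2.1 = none then some st.2.2 else st.2.1), st.2.2 - (cl.2 : Int))
        else if cl.1 = '0' ∧ st.2.1 ≠ none then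
          (st.1 + (cl.2 : Int), st.2.1, st.2.2 - (cl.2 : Int))
        else
          (st.1, st.2.1, st.2.2 - (cl.2 : Int))) = pvF2 := rfl
  cases hr : pvRunsR row.toList.reverse with
  | nil =>
    have e2 : pvBRow row = none := by
      simp [pvBRow, pvBRuns_eq, hr]
    rw [e2]
    simp [pvRunA, pvTransRuns]
  | cons p rest =>
    cases p with
    | mk c n =>
      have hadj := pvRunsR_adj row.toList.reverse
      have hpos := pvRunsR_pos row.toList.reverse
      rw [hr] at hadj hpos
      by_cases hc0 : c = '0'
      · subst hc0
        have hpos4 : ∀ q ∈ rest.take 4, 1 ≤ q.2 :=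
          fun q hq => hpos q (List.mem_cons_of_mem _ (List.mem_of_mem_take hq))
        -- A consumes the leading '0' run without a change
        have h1 : pvRunA (('0', n) :: rest) ((row.toList.length : Int) - 1) 0 0 '0' ep =
            pvRunA rest ((row.toList.length : Int) - 1 - n) 0 0 '0' ep := by
          simp [pvRunA, pvChunkCount, pvChunkEp]
        rw [h1, pvRunA_eq rest _ 0 0 '0' ep (pvAdjOk_tail _ _ hadj)
          (fun q hq => pvAdjOk_head _ _ hadj q hq) le_rfl (by norm_num)]
        have htk : ((4 : Int) - 0).toNat = 4 := by decide
        rw [htk]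
        have hfold := pvFold_eq (rest.take 4) ((row.toList.length : Int) - 1 - n) 0 ep none
          le_rfl (Or.inl ⟨rfl, rfl⟩) hpos4
        have htr : pvTransRuns (('0', n) :: rest) = rest.length := by simp [pvTransRuns]
        have hsets : pvSetsRuns row = (rest.take 4).any (fun r => r.1 = '1') := by
          simp [pvSetsRuns, hr, pvLimRuns]
        -- B's row, reduced up to the break condition
        have hB0 : ∀ out, pvBRow row = out ↔
            (if ((rest.length + 1 : Int)) - 1 + 0 < 4 then none else
              match ((rest.take 4).foldl pvF2
                  ((0 : Int), (none : Option Int), (row.toList.length : Int) - 1 - n)).2.1 with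
              | none => none
              | some e => some (PySem.Int.floordiv
                  ((rest.take 4).foldl pvF2
                    ((0 : Int), (none : Option Int), (row.toList.length : Int) - 1 - n)).1 7, e)) = out := by
          intro out
          constructor <;> intro hout <;> rw [← hout]
          · simp only [pvBRow, pvBRuns_eq, hr, hF2]
            simp [pvF2]
          · simp only [pvBRow, pvBRuns_eq, hr, hF2]
            simp [pvF2]
        refine ⟨?_, ?_, ?_⟩
        · rw [htr]
          show min (0 + (rest.length : Int)) 4 = 4 ↔ _
          push_cast
          omega
        · intro ht hs
          rw [htr] at ht
          rw [hsets] at hs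
          have hone : ¬ ∀ q ∈ rest.take 4, q.1 ≠ '1' := by
            simp only [List.any_eq_true] at hs
            obtain ⟨q, hq, hq1⟩ := hs
            intro hall
            exact hall q hq (by simpa using hq1)
          have hnone : ((rest.take 4).foldl pvF2
              ((0 : Int), (none : Option Int), (row.toList.length : Int) - 1 - n)).2.1 ≠ none := by
            intro hx
            exact hone (hfold.2.2.mp hx).2
          cases hx : ((rest.take 4).foldl pvF2
              ((0 : Int), (none : Option Int), (row.toList.length : Int) - 1 - n)).2.1 with
          | none => exact absurd hx hnone
          | some e =>
            rw [(hB0 _).mpr rfl]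
            rw [if_neg (by push_cast; omega), hx]
            have hepr : (pvPhase2 (rest.take 4) ((row.toList.length : Int) - 1 - n) 0 ep).2 = some e := by
              rw [hfold.2.1, hx]; simp
            show _ = some (PySem.Int.floordiv (pvPhase2 (rest.take 4) _ 0 ep).1 7,
              ((pvPhase2 (rest.take 4) _ 0 ep).2).getD 0)
            rw [hepr, ← hfold.1]
            simp
        · intro hn
          rw [(hB0 _).mpr rfl]
          by_cases hts : (4 : Nat) ≤ rest.length
          · have hs : pvSetsRuns row = false := by
              rcases Bool.eq_false_or_eq_true (pvSetsRuns row) with h | h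
              · exact absurd ⟨by rw [htr]; exact hts, h⟩ hn
              · exact h
            rw [hsets] at hs
            have hall : ∀ q ∈ rest.take 4, q.1 ≠ '1' := by
              simp only [List.any_eq_false] at hs
              intro q hq
              simpa using hs q hq
            rw [if_neg (by push_cast; omega), hfold.2.2.mpr ⟨rfl, hall⟩]
          · rw [if_pos (by push_cast; omega)]
      · have hpos4 : ∀ q ∈ ((c, n) :: rest).take 4, 1 ≤ q.2 :=
          fun q hq => hpos q (List.mem_of_mem_take hq)
        rw [pvRunA_eq ((c, n) :: rest) _ 0 0 '0' ep hadj
          (by intro q hq; simp at hq; subst hq; exact hc0) le_rfl (by norm_num)]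
        have htk : ((4 : Int) - 0).toNat = 4 := by decide
        rw [htk]
        have hfold := pvFold_eq (((c, n) :: rest).take 4) ((row.toList.length : Int) - 1) 0 ep none
          le_rfl (Or.inl ⟨rfl, rfl⟩) hpos4
        have htr : pvTransRuns ((c, n) :: rest) = rest.length + 1 := by
          simp [pvTransRuns, hc0]
        have hsets : pvSetsRuns row = (((c, n) :: rest).take 4).any (fun r => r.1 = '1') := by
          simp [pvSetsRuns, hr, pvLimRuns, hc0]
        have hB0 : pvBRow row =
            (if ((rest.length + 1 : Int)) - 1 + 1 < 4 then none else
              match ((((c, n) :: rest).take 4).foldl pvF2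
                  ((0 : Int), (none : Option Int), (row.toList.length : Int) - 1)).2.1 with
              | none => none
              | some e => some (PySem.Int.floordiv
                  ((((c, n) :: rest).take 4).foldl pvF2
                    ((0 : Int), (none : Option Int), (row.toList.length : Int) - 1)).1 7, e)) := by
          simp only [pvBRow, pvBRuns_eq, hr, hF2]
          simp [hc0]
        refine ⟨?_, ?_, ?_⟩
        · rw [htr]
          show min (0 + ((rest.length : Int) + 1)) 4 = 4 ↔ _
          push_cast
          omega
        · intro ht hs
          rw [htr] at ht
          rw [hsets] at hs
          have hone : ¬ ∀ q ∈ ((c, n) :: rest).take 4, q.1 ≠ '1' := by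
            simp only [List.any_eq_true] at hs
            obtain ⟨q, hq, hq1⟩ := hs
            intro hall
            exact hall q hq (by simpa using hq1)
          have hnone : ((((c, n) :: rest).take 4).foldl pvF2
              ((0 : Int), (none : Option Int), (row.toList.length : Int) - 1)).2.1 ≠ none := by
            intro hx
            exact hone (hfold.2.2.mp hx).2
          cases hx : ((((c, n) :: rest).take 4).foldl pvF2
              ((0 : Int), (none : Option Int), (row.toList.length : Int) - 1)).2.1 with
          | none => exact absurd hx hnone
          | some e =>
            rw [hB0]
            rw [if_neg (by push_cast; omega), hx]
            have hepr : (pvPhase2 (((c, n) :: rest).take 4) ((row.toList.length : Int) - 1) 0 ep).2 = some e := by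
              rw [hfold.2.1, hx]; simp
            show _ = some (PySem.Int.floordiv (pvPhase2 (((c, n) :: rest).take 4) _ 0 ep).1 7,
              ((pvPhase2 (((c, n) :: rest).take 4) _ 0 ep).2).getD 0)
            rw [hepr, ← hfold.1]
            simp
        · intro hn
          rw [hB0]
          by_cases hts : (4 : Nat) ≤ rest.length + 1
          · have hs : pvSetsRuns row = false := by
              rcases Bool.eq_false_or_eq_true (pvSetsRuns row) with h | h
              · exact absurd ⟨by rw [htr]; exact hts, h⟩ hn
              · exact h
            rw [hsets] at hs
            have hall : ∀ q ∈ ((c, n) :: rest).take 4, q.1 ≠ '1' := by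
              simp only [List.any_eq_false] at hs
              intro q hq
              simpa using hs q hq
            rw [if_neg (by push_cast; omega), hfold.2.2.mpr ⟨rfl, hall⟩]
          · rw [if_pos (by push_cast; omega)]

theorem pvBadRuns_false (row : String) (h : pvBadRuns row = false) :
    ¬ 4 ≤ pvTransRuns (pvRunsR row.toList.reverse) ∨ pvSetsRuns row = true := by
  simp only [pvBadRuns, Bool.and_eq_false_iff, decide_eq_false_iff_not, Bool.not_eq_false'] at h
  rcases h with h | h
  · exact Or.inl h
  · exact Or.inr h

theorem pvAux_eq : ∀ (l : List String) (ep : Option Int), (∀ row ∈ l, pvBadRuns row = false) →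
    pvAuxA l ep = l.filterMap pvBRow := by
  intro l
  induction l with
  | nil => intro ep h; simp [pvAuxA]
  | cons row rest ih =>
    intro ep h
    have hrow := pvRow_main row ep
    have hbadf := pvBadRuns_false row (h row (by simp))
    have hrest : ∀ r ∈ rest, pvBadRuns r = false := fun r hr => h r (List.mem_cons_of_mem _ hr)
    simp only [pvAuxA, List.filterMap_cons]
    by_cases h4 : (pvInnerA row.toList.reverse ((row.toList.length : Int) - 1) 0 0 '0' ep).2.1 = 4
    · have ht : 4 ≤ pvTransRuns (pvRunsR row.toList.reverse) := hrow.1.mp h4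
      have hs : pvSetsRuns row = true := by
        rcases hbadf with h' | h'
        · exact absurd ht h'
        · exact h'
      rw [if_pos h4, hrow.2.1 ht hs, ih _ hrest]
    · have hB : pvBRow row = none := by
        apply hrow.2.2
        intro ⟨ht, _⟩
        exact h4 (hrow.1.mpr ht)
      rw [if_neg h4, hB, ih _ hrest]

theorem pvAux_len : ∀ (l : List String) (ep : Option Int),
    (pvAuxA l ep).length =
      l.countP (fun row => decide (4 ≤ pvTransRuns (pvRunsR row.toList.reverse))) := by
  intro l
  induction l with
  | nil => intro ep; simp [pvAuxA]
  | cons row rest ih =>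
    intro ep
    have hrow := pvRow_main row ep
    simp only [pvAuxA, List.countP_cons]
    by_cases h4 : (pvInnerA row.toList.reverse ((row.toList.length : Int) - 1) 0 0 '0' ep).2.1 = 4
    · rw [if_pos h4]
      simp only [List.length_cons, ih]
      have : decide (4 ≤ pvTransRuns (pvRunsR row.toList.reverse)) = true := by
        simp [hrow.1.mp h4]
      rw [this]
      simp
    · rw [if_neg h4]
      rw [ih]
      have : decide (4 ≤ pvTransRuns (pvRunsR row.toList.reverse)) = false := by
        simp only [decide_eq_false_iff_not]
        intro ht
        exact h4 (hrow.1.mpr ht)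
      rw [this]
      simp

theorem pvBRow_isSome (row : String) :
    (pvBRow row).isSome =
      (decide (4 ≤ pvTransRuns (pvRunsR row.toList.reverse)) && pvSetsRuns row) := by
  have hrow := pvRow_main row none
  by_cases h : 4 ≤ pvTransRuns (pvRunsR row.toList.reverse) ∧ pvSetsRuns row = true
  · rw [hrow.2.1 h.1 h.2]
    simp [h.1, h.2]
  · rw [hrow.2.2 h]
    simp only [Option.isSome_none, Bool.false_eq, Bool.and_eq_false_iff,
      decide_eq_false_iff_not]
    by_cases h1 : 4 ≤ pvTransRuns (pvRunsR row.toList.reverse)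
    · exact Or.inr (by
        rcases Bool.eq_false_or_eq_true (pvSetsRuns row) with hs | hs
        · exact absurd ⟨h1, hs⟩ h
        · exact hs)
    · exact Or.inl h1

theorem pvCountP_lt {α : Type} (p q : α → Bool) :
    ∀ (l : List α), (∀ x ∈ l, q x = true → p x = true) →
      ∀ x ∈ l, p x = true → q x = false → l.countP q < l.countP p := by
  intro l
  induction l with
  | nil => intro _ x hx; simp at hx
  | cons a rest ih =>
    intro himp x hx hp hq
    have hle : rest.countP q ≤ rest.countP p :=
      List.countP_mono_left (fun y hy h => himp y (List.mem_cons_of_mem _ hy) h)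
    rcases List.mem_cons.mp hx with h | h
    · subst h
      simp only [List.countP_cons, hp, hq, if_true, if_false]
      simp
      omega
    · have hlt := ih (fun y hy h' => himp y (List.mem_cons_of_mem _ hy) h') x h hp hq
      by_cases hqa : q a = true
      · have hpa := himp a (by simp) hqa
        simp only [List.countP_cons, hqa, hpa, if_true]
        omega
      · have hqa' : q a = false := by simpa using hqa
        simp only [List.countP_cons, hqa']
        by_cases hpa : p a = true
        · simp only [hpa, if_true, if_false]
          simp
          omega
        · have hpa' : p a = false := by simpa using hpa
          simp only [hpa', if_false]
          simp
          omega

theorem pvFilterMap_len {α β : Type} (f : α → Option β) :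
    ∀ l : List α, (l.filterMap f).length = l.countP (fun x => (f x).isSome) := by
  intro l
  induction l with
  | nil => simp
  | cons a rest ih =>
    simp only [List.filterMap_cons, List.countP_cons]
    cases hf : f a <;> simp [hf, ih]

theorem pvAll_not_bad (arr : List String) (hnd : ¬ D_get_width arr) :
    ∀ row ∈ arr, pvBadRuns row = false := by
  intro row hrow
  rcases Bool.eq_false_or_eq_true (pvBadRuns row) with h | h
  · exact absurd (List.any_eq_true.mpr ⟨row, hrow, by rw [pvBadC_eq]; exact h⟩) hnd
  · exact h

-- ===== VERDICT (by name: the statement is the Claim_ definition above) =====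
theorem get_width_spec : Claim_unchanged_get_width := by
  intro arr _ _ hnd
  exact pvAux_eq arr none (pvAll_not_bad arr hnd)

theorem get_width_changed : Claim_changed_get_width := by
  unfold Claim_changed_get_width; decide

theorem get_width_tight : Claim_exact_get_width := by
  intro arr _ _ hd heq
  obtain ⟨row, hrow, hbad⟩ := List.any_eq_true.mp hd
  have hb := hbad
  rw [pvBadC_eq] at hb
  simp only [pvBadRuns, Bool.and_eq_true, decide_eq_true_eq, Bool.not_eq_true'] at hb
  have hlenA : (get_width arr).length =
      arr.countP (fun row => decide (4 ≤ pvTransRuns (pvRunsR row.toList.reverse))) :=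
    pvAux_len arr none
  have hlenB : (get_width_alt arr).length =
      arr.countP (fun row =>
        decide (4 ≤ pvTransRuns (pvRunsR row.toList.reverse)) && pvSetsRuns row) := by
    rw [show get_width_alt arr = arr.filterMap pvBRow from rfl, pvFilterMap_len]
    exact List.countP_congr (fun x _ => by rw [pvBRow_isSome x])
  have hlt := pvCountP_lt
    (fun row => decide (4 ≤ pvTransRuns (pvRunsR row.toList.reverse)))
    (fun row => decide (4 ≤ pvTransRuns (pvRunsR row.toList.reverse)) && pvSetsRuns row)
    arr (fun x _ hx => by simp only [Bool.and_eq_true] at hx; exact hx.1) row hrow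
    (by simp [hb.1]) (by simp [hb.1, hb.2])
  rw [heq, hlenB] at hlenA
  omega
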